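-- pv_equiv track=rewrite | github.com/oar-team/interval_set | interval_set/interval_set.py | string_to_interval_set
-- ===== SOURCE A (Python) =====
-- def string_to_interval_set(s, separator=" "):
--     """Transforms a string interval set representation to interval set
--
--     >>> string_to_interval_set("1 2 3 7-9 13")
--     [(1, 1), (2, 2), (3, 3), (7, 9), (13, 13)]
--     >>> string_to_interval_set("")
--     []
--     >>> string_to_interval_set("(2,3)")
--     Traceback (most recent call last):
--         ...
--     ValueError: Bad interval format. Parsed string is: (2,3)
--     """
--     intervals = []
--     if not s:
--         return []
--     try:
--         res_str = s.split(separator)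
--         if '-' in (separator).join(res_str):
--             # it is already intervals so get it directly
--             for inter in res_str:
--                 splitted = inter.split('-')
--                 if len(splitted) == 2:
--                     (begin, end) = splitted
--                     intervals.append((int(begin), int(end)))
--                 else:
--                     intervals.append((int(inter), int(inter)))
--         else:
--             res = sorted([int(x) for x in res_str])
--             intervals = id_list_to_iterval_set(res)
--     except (ValueError, IndexError):
--         raise ValueError("Bad interval format. Parsed string is: {}".format(s))
--
--     return intervals
--
-- def id_list_to_iterval_set(ids):
--     """Convert list of ID (int) to an intervals set"""
--     itvs = []
--     if ids:
--         b = ids[0]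
--         e = ids[0]
--         for i in ids:
--             if i > (e + 1):  # end itv and prepare new itv
--                 itvs.append((b, e))
--                 b = i
--             e = i
--         itvs.append((b, e))
--
--     return itvs
-- ===== SOURCE B (Python) =====
-- def string_to_interval_set(s, separator=" "):
--     """Transforms a string interval set representation to interval set."""
--     if not s:
--         return []
--     try:
--         tokens = s.split(separator)
--         if '-' in s:
--             # explicit interval tokens: "a-b" or a bare integer
--             return [_parse_token(tok) for tok in tokens]
--         ids = sorted({int(x) for x in tokens})
--         if not ids:
--             return []
--         starts = [ids[0]] + [b for a, b in zip(ids, ids[1:]) if a + 1 < b]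
--         ends = [a for a, b in zip(ids, ids[1:]) if a + 1 < b] + [ids[-1]]
--         return list(zip(starts, ends))
--     except ValueError:
--         raise ValueError("Bad interval format. Parsed string is: {}".format(s))
--
--
-- def _parse_token(tok):
--     left, dash, right = tok.partition('-')
--     if dash:
--         return (int(left), int(right))
--     return (int(tok), int(tok))
-- ===== Notes on version B (the rewrite author's own statement) =====
-- stated objective: idiomatic
-- what changed: The branch test becomes '-' in s (provably equal to re-joining the split), interval tokens are parsed with str.partition instead of split+length dispatch, and the numeric branch replaces the stateful begin/end scan with sorted(set(...)) plus comprehensions over adjacent pairs that pick run starts/ends and zip them.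
import Mathlib
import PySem

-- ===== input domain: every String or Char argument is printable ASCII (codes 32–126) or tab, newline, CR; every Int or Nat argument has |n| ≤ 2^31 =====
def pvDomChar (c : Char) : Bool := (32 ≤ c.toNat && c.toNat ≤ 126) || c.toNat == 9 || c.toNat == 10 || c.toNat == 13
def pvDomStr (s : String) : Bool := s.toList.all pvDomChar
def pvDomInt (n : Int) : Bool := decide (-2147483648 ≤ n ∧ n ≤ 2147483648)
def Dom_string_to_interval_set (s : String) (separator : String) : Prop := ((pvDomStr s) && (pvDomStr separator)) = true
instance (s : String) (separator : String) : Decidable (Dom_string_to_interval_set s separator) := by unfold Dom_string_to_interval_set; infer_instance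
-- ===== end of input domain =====

-- B re-parses interval tokens at the first '-' (str.partition), tests the branch on '-' in s
-- (provably equal to re-joining the split), and builds the numeric intervals by zipping
-- run starts/ends taken from adjacent pairs of sorted(set(ids)) — idiomatic, same cost.


-- ===== PORT A =====
-- helper id_list_to_iterval_set: stateful begin/end scan over the sorted ids
def id_list_to_iterval_set (ids : List Int) : List (Int × Int) :=
  match ids with
  | [] => []
  | i0 :: _ =>
    let st := ids.foldl
      (fun (st : List (Int × Int) × Int × Int) i =>
        if st.2.2 + 1 < i then (st.1 ++ [(st.2.1, st.2.2)], i, i)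
        else (st.1, st.2.1, i)) ([], i0, i0)
    st.1 ++ [(st.2.1, st.2.2)]

-- one token of A's interval branch: inter.split('-'); a pair if len == 2, else int(inter)
-- (none = the int()/ValueError path, excluded by Pre_)
def pvAtok (inter : String) : Option (Int × Int) :=
  match (PySem.Str.split? inter "-").getD [] with
  | [b, e] =>
    match PySem.Int.ofStr? b, PySem.Int.ofStr? e with
    | some bi, some ei => some (bi, ei)
    | _, _ => none
  | _ => (PySem.Int.ofStr? inter).map (fun v => (v, v))

def string_to_interval_set (s : String) (separator : String) : List (Int × Int) :=
  if s = "" then []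
  else
    match PySem.Str.split? s separator with
    | none => []      -- s.split("") raises ValueError (re-raised): outside Pre_
    | some res_str =>
      if PySem.Str.isIn "-" (PySem.Str.join separator res_str) then
        (res_str.foldl (fun acc inter => acc.bind fun ivs => (pvAtok inter).map (fun p => ivs ++ [p]))
          (some [])).getD []     -- .getD []: the none case is the ValueError path, outside Pre_
      else
        match res_str.mapM PySem.Int.ofStr? with
        | none => []  -- int(x) raises ValueError (re-raised): outside Pre_
        | some xs => id_list_to_iterval_set (PySem.List.sorted xs (fun x => x) false)

-- ===== PORT B =====
-- _parse_token: tok.partition('-') ported via the index of the FIRST '-' (exact: that is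
-- what str.partition splits at); none = the int()/ValueError path, excluded by Pre_
def pvBtok (tok : String) : Option (Int × Int) :=
  let i := PySem.Str.find tok "-"
  if i = -1 then (PySem.Int.ofStr? tok).map (fun v => (v, v))
  else
    match PySem.Int.ofStr? (String.ofList (tok.toList.take i.toNat)),
          PySem.Int.ofStr? (String.ofList (tok.toList.drop (i.toNat + 1))) with
    | some l, some r => some (l, r)
    | _, _ => none

def string_to_interval_set_alt (s : String) (separator : String) : List (Int × Int) :=
  if s = "" then []
  else
    match PySem.Str.split? s separator with
    | none => []      -- s.split("") raises ValueError (re-raised): outside Pre_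
    | some tokens =>
      if PySem.Str.isIn "-" s then
        (tokens.mapM pvBtok).getD []   -- [_parse_token(tok) for tok in tokens]
      else
        match tokens.mapM PySem.Int.ofStr? with
        | none => []  -- int(x) raises ValueError (re-raised): outside Pre_
        | some xs =>
          match PySem.List.sorted (PySem.Set.ofList xs) (fun x => x) false with
          | [] => []
          | x :: rest =>
            -- starts = [ids[0]] + run starts, ends = run ends + [ids[-1]], zipped
            ((x :: ((x :: rest).zip rest).filterMap (fun p => if p.1 + 1 < p.2 then some p.2 else none)).zip
              (((x :: rest).zip rest).filterMap (fun p => if p.1 + 1 < p.2 then some p.1 else none)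
                ++ [rest.getLastD x]))

-- ===== PRECONDITION & SPEC =====
-- a token the interval branch parses without a ValueError
def pvTokOK (t : String) : Bool :=
  if PySem.Str.isIn "-" t then
    match (PySem.Str.split? t "-").getD [] with
    | [b, e] => (PySem.Int.ofStr? b).isSome && (PySem.Int.ofStr? e).isSome
    | _ => false
  else (PySem.Int.ofStr? t).isSome

-- Pre_ excludes exactly the inputs on which A raises ValueError: a non-empty s with an
-- empty separator, or a token that the int()/interval parsing rejects.
def Pre_string_to_interval_set (s : String) (separator : String) : Prop :=
  s = "" ∨ (separator ≠ "" ∧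
    ∀ t ∈ (PySem.Str.split? s separator).getD [],
      (if PySem.Str.isIn "-" s then pvTokOK t else (PySem.Int.ofStr? t).isSome) = true)
instance (s : String) (separator : String) : Decidable (Pre_string_to_interval_set s separator) := by
  unfold Pre_string_to_interval_set; infer_instance

def pvWitness_string_to_interval_set : String × String := ("1 2-4 13", " ")

def Spec_string_to_interval_set (s : String) (separator : String) (out : List (Int × Int)) : Prop := out = string_to_interval_set_alt s separator
instance (s : String) (separator : String) (out : List (Int × Int)) : Decidable (Spec_string_to_interval_set s separator out) := by unfold Spec_string_to_interval_set; infer_instance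

-- ===== CLAIM (what is proved, stated in full; the proofs are below) =====
def Claim_equal_string_to_interval_set : Prop := ∀ (s : String) (separator : String), Dom_string_to_interval_set s separator → Pre_string_to_interval_set s separator → Spec_string_to_interval_set s separator (string_to_interval_set s separator)

-- ===== LEMMAS AND PROOFS =====

-- ---- 1. separator.join(s.split(separator)) == s ----
theorem pv_join_cons (sep x : List Char) (L : List (List Char)) (h : L ≠ []) :
    PySem.Chars.join sep (x :: L) = x ++ sep ++ PySem.Chars.join sep L := by
  cases L with
  | nil => exact absurd rfl h
  | cons y ys => exact PySem.Chars.join_cons_cons sep x y ys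

theorem pv_join_two (sep : List Char) : ∀ (xs : List (List Char)) (a b : List Char),
    PySem.Chars.join sep (xs ++ [a, b]) = PySem.Chars.join sep (xs ++ [a ++ sep ++ b]) := by
  intro xs
  induction xs with
  | nil =>
    intro a b
    simp [PySem.Chars.join_cons_cons, PySem.Chars.join_singleton, List.append_assoc]
  | cons x xs ih =>
    intro a b
    rw [List.cons_append, List.cons_append,
      pv_join_cons sep x (xs ++ [a, b]) (by simp),
      pv_join_cons sep x (xs ++ [a ++ sep ++ b]) (by simp), ih]

theorem pv_go_join (sep : List Char) (hsep : sep ≠ []) :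
    ∀ (fuel : Nat) (l cur : List Char) (acc : List (List Char)), l.length < fuel →
      PySem.Chars.join sep (PySem.Chars.splitOn.go sep fuel l cur acc)
        = PySem.Chars.join sep (acc.reverse ++ [cur.reverse ++ l]) := by
  intro fuel
  induction fuel with
  | zero => intro l cur acc h; omega
  | succ n ih =>
    intro l cur acc h
    cases l with
    | nil =>
      show PySem.Chars.join sep (cur.reverse :: acc).reverse = _
      simp
    | cons c rest =>
      show PySem.Chars.join sep
        (if sep.isPrefixOf (c :: rest) then
          PySem.Chars.splitOn.go sep n (List.drop sep.length (c :: rest)) [] (cur.reverse :: acc)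
         else PySem.Chars.splitOn.go sep n rest (c :: cur) acc) = _
      by_cases hp : sep.isPrefixOf (c :: rest)
      · rw [if_pos hp]
        have hpre : sep <+: (c :: rest) := List.isPrefixOf_iff_prefix.mp hp
        have hlen : 1 ≤ sep.length := List.length_pos_iff.mpr hsep
        have hrec := ih (List.drop sep.length (c :: rest)) [] (cur.reverse :: acc)
          (by simp at h ⊢; omega)
        rw [hrec]
        have hsp : sep ++ List.drop sep.length (c :: rest) = c :: rest :=
          List.prefix_iff_eq_append.mp hpre
        calc PySem.Chars.join sep ((cur.reverse :: acc).reverse ++ [[] ++ List.drop sep.length (c :: rest)])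
            = PySem.Chars.join sep (acc.reverse ++ [cur.reverse, List.drop sep.length (c :: rest)]) := by simp
          _ = PySem.Chars.join sep (acc.reverse ++ [cur.reverse ++ sep ++ List.drop sep.length (c :: rest)]) :=
              pv_join_two sep acc.reverse _ _
          _ = PySem.Chars.join sep (acc.reverse ++ [cur.reverse ++ (c :: rest)]) := by
              rw [List.append_assoc, hsp]
      · rw [if_neg hp]
        have hrec := ih rest (c :: cur) acc (by simp at h ⊢; omega)
        rw [hrec]; simp

theorem pv_join_splitOn (sep cs : List Char) (hsep : sep ≠ []) :
    PySem.Chars.join sep (PySem.Chars.splitOn cs sep) = cs := by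
  have := pv_go_join sep hsep (cs.length + 1) cs [] [] (by omega)
  simpa [PySem.Chars.splitOn, PySem.Chars.join_singleton] using this

-- ---- 2. single-character split is List.splitOn ----
theorem pv_modifyHead_id {α : Type} (l : List α) : List.modifyHead (fun x => x) l = l := by
  cases l <;> simp

theorem pv_go_char (d : Char) :
    ∀ (fuel : Nat) (l cur : List Char) (acc : List (List Char)), l.length < fuel →
      PySem.Chars.splitOn.go [d] fuel l cur acc
        = acc.reverse ++ (List.splitOn d l).modifyHead (cur.reverse ++ ·) := by
  intro fuel
  induction fuel with
  | zero => intro l cur acc h; omega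
  | succ n ih =>
    intro l cur acc h
    cases l with
    | nil =>
      show (cur.reverse :: acc).reverse = _
      simp [List.splitOn]
    | cons c rest =>
      show (if [d].isPrefixOf (c :: rest) then
          PySem.Chars.splitOn.go [d] n (List.drop 1 (c :: rest)) [] (cur.reverse :: acc)
         else PySem.Chars.splitOn.go [d] n rest (c :: cur) acc) = _
      simp at h
      by_cases hd : c = d
      · rw [if_pos (by simp [hd, List.isPrefixOf])]
        rw [show List.drop 1 (c :: rest) = rest from rfl, ih rest [] (cur.reverse :: acc) h]
        simp [List.splitOn, List.splitOnP_cons, hd, pv_modifyHead_id]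
      · rw [if_neg (by simp [List.isPrefixOf]; exact fun hdc => absurd hdc.symm hd)]
        rw [ih rest (c :: cur) acc h]
        simp [List.splitOn, List.splitOnP_cons, hd, List.modifyHead_modifyHead]
        congr 1

theorem pv_splitOn_char (d : Char) (l : List Char) :
    PySem.Chars.splitOn l [d] = List.splitOn d l := by
  have := pv_go_char d (l.length + 1) l [] [] (by omega)
  simpa [PySem.Chars.splitOn, pv_modifyHead_id] using this

theorem pv_splitOn_of_not_mem (d : Char) (l : List Char) (h : d ∉ l) :
    List.splitOn d l = [l] := by
  induction l with
  | nil => rfl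
  | cons c rest ih =>
    have hc : ¬ (c = d) := fun hcd => h (hcd ▸ List.mem_cons_self)
    have := ih (fun hm => h (List.mem_cons_of_mem _ hm))
    simp [List.splitOn, List.splitOnP_cons, hc] at this ⊢
    rw [this]; rfl

theorem pv_splitOn_singleton (d : Char) : ∀ (l e : List Char), List.splitOn d l = [e] →
    l = e ∧ d ∉ l := by
  intro l
  induction l with
  | nil =>
    intro e h; simp [List.splitOn] at h; exact ⟨h.symm, by simp⟩
  | cons c rest ih =>
    intro e h
    by_cases hc : c = d
    · simp [List.splitOn, List.splitOnP_cons, hc] at h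
      exact absurd h.2 (List.splitOnP_ne_nil _ _)
    · simp only [List.splitOn, List.splitOnP_cons, beq_iff_eq, hc, if_false] at h
      cases hr : List.splitOnP (fun x => x == d) rest with
      | nil => rw [hr] at h; simp at h
      | cons y ys =>
        rw [hr] at h
        simp [List.modifyHead] at h
        obtain ⟨he, hys⟩ := h
        obtain ⟨hre, hnd⟩ := ih y (by rw [List.splitOn, hr, hys])
        constructor
        · rw [← he, hre]
        · intro hm
          rcases List.mem_cons.mp hm with h1 | h2
          · exact hc h1.symm
          · exact hnd h2

theorem pv_splitOn_pair (d : Char) : ∀ (l b e : List Char), List.splitOn d l = [b, e] →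
    l = b ++ d :: e ∧ d ∉ b := by
  intro l
  induction l with
  | nil => intro b e h; simp [List.splitOn] at h
  | cons c rest ih =>
    intro b e h
    by_cases hc : c = d
    · simp only [List.splitOn, List.splitOnP_cons, beq_iff_eq, hc, if_true] at h
      obtain ⟨hb, hrest⟩ := List.cons_eq_cons.mp h
      obtain ⟨hre, _⟩ := pv_splitOn_singleton d rest e (by rw [List.splitOn]; exact hrest)
      exact ⟨by rw [← hb, hre, hc]; rfl, by rw [← hb]; simp⟩
    · simp only [List.splitOn, List.splitOnP_cons, beq_iff_eq, hc, if_false] at h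
      cases hr : List.splitOnP (fun x => x == d) rest with
      | nil => rw [hr] at h; simp at h
      | cons y ys =>
        rw [hr] at h
        simp [List.modifyHead] at h
        obtain ⟨hb, hys⟩ := h
        obtain ⟨hre, hnd⟩ := ih y e (by rw [List.splitOn, hr, hys])
        refine ⟨?_, ?_⟩
        · rw [← hb, hre]; rfl
        · rw [← hb]
          intro hm
          rcases List.mem_cons.mp hm with h1 | h2
          · exact hc h1.symm
          · exact hnd h2

-- ---- 3. the first '-' of b ++ '-' :: e with '-' ∉ b ----
theorem pv_singleton_infix (d : Char) (l : List Char) : [d] <:+: l ↔ d ∈ l := by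
  constructor
  · rintro ⟨pre, suf, rfl⟩; simp
  · intro hm
    obtain ⟨pre, suf, rfl⟩ := List.append_of_mem hm
    exact ⟨pre, suf, by simp⟩

theorem pv_singleton_prefix (d : Char) (l : List Char) : [d] <+: l ↔ ∃ m, l = d :: m := by
  constructor
  · rintro ⟨t, rfl⟩; exact ⟨t, rfl⟩
  · rintro ⟨m, rfl⟩; exact ⟨m, rfl⟩

theorem pv_find_at (d : Char) (b e : List Char) (hb : d ∉ b) :
    PySem.Chars.find (b ++ d :: e) [d] = (b.length : Int) := by
  have hinf : [d] <:+: (b ++ d :: e) := (pv_singleton_infix d _).mpr (by simp)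
  have hnn : 0 ≤ PySem.Chars.find (b ++ d :: e) [d] := (PySem.Chars.find_nonneg_iff _ _).mpr hinf
  obtain ⟨hpre, hmin⟩ := PySem.Chars.find_spec hnn
  set k := (PySem.Chars.find (b ++ d :: e) [d]).toNat with hk
  have hkb : k = b.length := by
    rcases lt_trichotomy k b.length with hlt | heq | hgt
    · exfalso
      obtain ⟨m, hm⟩ := (pv_singleton_prefix d _).mp hpre
      have h0 : (b ++ d :: e)[k]? = some d := by
        have : (List.drop k (b ++ d :: e))[0]? = some d := by rw [hm]; rfl
        rw [List.getElem?_drop] at this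
        simpa using this
      rw [List.getElem?_append_left hlt] at h0
      exact hb (List.mem_of_getElem? h0)
    · exact heq
    · exfalso
      apply hmin b.length hgt
      rw [List.drop_left' rfl]
      exact ⟨e, rfl⟩
  have := Int.toNat_of_nonneg hnn
  omega

-- ---- 4. per-token equality of the two interval parsers ----
theorem pv_split_dash (t : String) :
    (PySem.Str.split? t "-").getD [] = (List.splitOn '-' t.toList).map String.ofList := by
  simp [PySem.Str.split?, PySem.Chars.split?, pv_splitOn_char]

theorem pv_tok_eq (t : String) (h : pvTokOK t = true) : pvAtok t = pvBtok t := by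
  by_cases hin : PySem.Str.isIn "-" t = true
  · rw [pvTokOK, if_pos hin, pv_split_dash] at h
    cases hsp : List.splitOn '-' t.toList with
    | nil => rw [hsp] at h; simp at h
    | cons a L1 =>
      cases L1 with
      | nil => rw [hsp] at h; simp at h
      | cons bl L2 =>
        cases L2 with
        | cons z zs => rw [hsp] at h; simp at h
        | nil =>
          rw [hsp] at h
          simp only [List.map] at h
          obtain ⟨htl, hnb⟩ := pv_splitOn_pair '-' t.toList a bl hsp
          obtain ⟨va, hva⟩ := Option.isSome_iff_exists.mp (Bool.and_elim_left h)
          obtain ⟨vb, hvb⟩ := Option.isSome_iff_exists.mp (Bool.and_elim_right h)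
          have hfind : PySem.Str.find t "-" = (a.length : Int) := by
            have : PySem.Chars.find t.toList ['-'] = (a.length : Int) := by
              rw [htl]; exact pv_find_at '-' a bl hnb
            simpa [PySem.Str.find] using this
          rw [pvAtok, pv_split_dash, hsp]
          rw [pvBtok]
          simp only [hfind]
          rw [if_neg (by omega)]
          have htake : t.toList.take ((a.length : Int)).toNat = a := by
            rw [htl, Int.toNat_natCast, List.take_left' rfl]
          have hdrop : t.toList.drop (((a.length : Int)).toNat + 1) = bl := by
            rw [htl, Int.toNat_natCast]
            have : a ++ '-' :: bl = (a ++ ['-']) ++ bl := by simp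
            rw [this, List.drop_left' (by simp)]
          rw [htake, hdrop]
          simp [hva, hvb]
  · have hnm : '-' ∉ t.toList := by
      have := (PySem.Chars.isIn_eq_false_iff "-".toList t.toList).mp (by
        simpa [PySem.Str.isIn] using (Bool.not_eq_true _).mp hin)
      simpa [pv_singleton_infix] using this
    have hfind : PySem.Str.find t "-" = -1 := by
      have : PySem.Chars.find t.toList ['-'] = -1 :=
        (PySem.Chars.find_eq_neg_one_iff _ _).mpr (by simpa [pv_singleton_infix] using hnm)
      simpa [PySem.Str.find] using this
    rw [pvAtok, pv_split_dash, pv_splitOn_of_not_mem '-' t.toList hnm]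
    rw [pvBtok]
    simp only [hfind]
    simp

-- ---- 5. A's append-fold is B's mapM ----
theorem pv_foldl_mapM (f : String → Option (Int × Int)) :
    ∀ (l : List String) (acc : List (Int × Int)),
      l.foldl (fun acc inter => acc.bind fun ivs => (f inter).map (fun p => ivs ++ [p])) (some acc)
        = (l.mapM f).map (fun r => acc ++ r) := by
  intro l
  induction l with
  | nil => intro acc; simp
  | cons t l ih =>
    intro acc
    rw [List.foldl_cons, List.mapM_cons]
    cases hft : f t with
    | none =>
      simp only [Option.bind_some, Option.map_none]
      have : ∀ (l : List String),
          l.foldl (fun acc inter => acc.bind fun ivs => (f inter).map (fun p => ivs ++ [p]))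
            (none : Option (List (Int × Int))) = none := by
        intro l; induction l <;> simp [*]
      simp [this]
    | some v =>
      simp only [Option.bind_some, Option.map_some]
      rw [ih (acc ++ [v])]
      cases l.mapM f <;> simp

theorem pv_mapM_congr (f g : String → Option (Int × Int)) :
    ∀ (l : List String), (∀ t ∈ l, f t = g t) → l.mapM f = l.mapM g := by
  intro l
  induction l with
  | nil => intro _; rfl
  | cons t l ih =>
    intro h
    rw [List.mapM_cons, List.mapM_cons, h t List.mem_cons_self,
      ih (fun x hx => h x (List.mem_cons_of_mem _ hx))]

-- ---- 6. the numeric branch: both scans build the same run decomposition ----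
-- canonical run builder shared by both characterisations
def pvExtend (b e : Int) : List Int → List (Int × Int)
  | [] => [(b, e)]
  | i :: l => if e + 1 < i then (b, e) :: pvExtend i i l else pvExtend b i l

-- drop consecutive duplicates, relative to the last kept value
def pvRad (e : Int) : List Int → List Int
  | [] => []
  | i :: l => if i = e then pvRad e l else i :: pvRad i l

theorem pv_idlist_foldl (l : List Int) :
    ∀ (itvs : List (Int × Int)) (b e : Int),
      (let st := l.foldl
        (fun (st : List (Int × Int) × Int × Int) i =>
          if st.2.2 + 1 < i then (st.1 ++ [(st.2.1, st.2.2)], i, i)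
          else (st.1, st.2.1, i)) (itvs, b, e)
       st.1 ++ [(st.2.1, st.2.2)]) = itvs ++ pvExtend b e l := by
  induction l with
  | nil => intro itvs b e; simp [pvExtend]
  | cons i l ih =>
    intro itvs b e
    simp only [List.foldl_cons]
    by_cases hc : e + 1 < i
    · rw [if_pos hc]
      have := ih (itvs ++ [(b, e)]) i i
      simp only [this, pvExtend, if_pos hc, List.append_assoc, List.singleton_append]
    · rw [if_neg hc]
      have := ih itvs b i
      simp only [this, pvExtend, if_neg hc]

theorem pv_idlist_eq (x : Int) (rest : List Int) :
    id_list_to_iterval_set (x :: rest) = pvExtend x x rest := by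
  show (let st := (x :: rest).foldl _ ([], x, x); st.1 ++ [(st.2.1, st.2.2)]) = _
  rw [List.foldl_cons]
  simp only [if_neg (by omega : ¬ (x + 1 < x))]
  simpa using pv_idlist_foldl rest [] x x

theorem pv_extend_rad (l : List Int) : ∀ (b e : Int), pvExtend b e l = pvExtend b e (pvRad e l) := by
  induction l with
  | nil => intro b e; rfl
  | cons i l ih =>
    intro b e
    by_cases hie : i = e
    · subst hie
      rw [pvRad, if_pos rfl, pvExtend, if_neg (by omega), ih]
    · rw [pvRad, if_neg hie, pvExtend, pvExtend]
      by_cases hc : e + 1 < i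
      · rw [if_pos hc, if_pos hc, ih]
      · rw [if_neg hc, if_neg hc, ih]

theorem pv_mem_rad_iff (l : List Int) : ∀ (e y : Int), (y ∈ e :: pvRad e l ↔ y ∈ e :: l) := by
  induction l with
  | nil => intro e y; rfl
  | cons i l ih =>
    intro e y
    by_cases hie : i = e
    · subst hie
      rw [pvRad, if_pos rfl]
      constructor
      · intro h; rcases List.mem_cons.mp ((ih i y).mp h) with h1 | h2
        · simp [h1]
        · simp [h2]
      · intro h
        rcases List.mem_cons.mp h with h1 | h2
        · exact (ih i y).mpr (by simp [h1])
        · exact (ih i y).mpr h2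
    · rw [pvRad, if_neg hie]
      constructor
      · intro h
        rcases List.mem_cons.mp h with h1 | h2
        · simp [h1]
        · rcases List.mem_cons.mp ((ih i y).mp h2) with h1 | h2
          · simp [h1]
          · simp [h2]
      · intro h
        rcases List.mem_cons.mp h with h1 | h2
        · simp [h1]
        · rcases List.mem_cons.mp h2 with h3 | h4
          · exact List.mem_cons_of_mem _ ((ih i y).mpr (by simp [h3]))
          · exact List.mem_cons_of_mem _ ((ih i y).mpr (by simp [h4]))

theorem pv_rad_pairwise (l : List Int) :
    ∀ (e : Int), (e :: l).Pairwise (· ≤ ·) → (e :: pvRad e l).Pairwise (· < ·) := by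
  induction l with
  | nil => intro e _; simp [pvRad]
  | cons i l ih =>
    intro e hp
    rw [List.pairwise_cons] at hp
    obtain ⟨hle, hp2⟩ := hp
    by_cases hie : i = e
    · subst hie
      rw [pvRad, if_pos rfl]
      exact ih i hp2
    · rw [pvRad, if_neg hie]
      have hei : e < i := lt_of_le_of_ne (hle i List.mem_cons_self) (fun h => hie h.symm)
      have hrec := ih i hp2
      rw [List.pairwise_cons] at hrec ⊢
      refine ⟨?_, List.pairwise_cons.mpr hrec⟩
      intro y hy
      rcases List.mem_cons.mp hy with h1 | h2
      · omega
      · have : i < y := hrec.1 y h2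
        omega

theorem pv_zip_extend (rest : List Int) :
    ∀ (b y : Int),
      ((b :: ((y :: rest).zip rest).filterMap (fun p => if p.1 + 1 < p.2 then some p.2 else none)).zip
        (((y :: rest).zip rest).filterMap (fun p => if p.1 + 1 < p.2 then some p.1 else none) ++ [rest.getLastD y]))
      = pvExtend b y rest := by
  induction rest with
  | nil => intro b y; simp [pvExtend]
  | cons z r ih =>
    intro b y
    simp only [List.zip_cons_cons, List.filterMap_cons, List.getLastD_cons]
    by_cases hc : y + 1 < z
    · simp only [if_pos hc]
      rw [pvExtend, if_pos hc]
      simp only [List.cons_append, List.zip_cons_cons]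
      rw [← ih z z]
    · simp only [if_neg hc]
      rw [pvExtend, if_neg hc]
      rw [← ih b z]

theorem pv_sorted_set (xs : List Int) (x : Int) (rest : List Int)
    (h : PySem.List.sorted xs (fun x => x) false = x :: rest) :
    PySem.List.sorted (PySem.Set.ofList xs) (fun x => x) false = x :: pvRad x rest := by
  have hpw : (x :: rest).Pairwise (· ≤ ·) := by
    have := PySem.List.sorted_pairwise xs (fun x => x)
    rw [h] at this
    exact this
  have hlt : (x :: pvRad x rest).Pairwise (· < ·) := pv_rad_pairwise rest x hpw
  apply PySem.List.sorted_eq_of_perm_of_pairwise_lt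
  · rw [List.perm_ext_iff_of_nodup (hlt.imp ne_of_lt) (PySem.Set.nodup_ofList _)]
    intro y
    rw [pv_mem_rad_iff, PySem.Set.mem_ofList]
    rw [← PySem.List.mem_sorted xs (fun x => x) false y, h]
  · exact hlt

-- ===== VERDICT (by name: the statement is the Claim_ definition above) =====
theorem string_to_interval_set_spec : Claim_equal_string_to_interval_set := by
  intro s sep hdom hpre
  unfold Spec_string_to_interval_set
  by_cases hs : s = ""
  · simp [string_to_interval_set, string_to_interval_set_alt, hs]
  · rcases hpre with h0 | ⟨hsep, htoks⟩
    · exact absurd h0 hs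
    have hsepl : sep.toList ≠ [] := by
      intro hnil
      apply hsep
      have : sep.toList = String.toList "" := by simpa using hnil
      exact String.toList_inj.mp this
    have hsp : PySem.Str.split? s sep
        = some ((PySem.Chars.splitOn s.toList sep.toList).map String.ofList) := by
      simp [PySem.Str.split?, PySem.Chars.split?, hsepl]
    set L := PySem.Chars.splitOn s.toList sep.toList with hL
    have hLs : PySem.Chars.join sep.toList L = s.toList := pv_join_splitOn sep.toList s.toList hsepl
    have hmapL : (L.map String.ofList).map String.toList = L := by
      rw [List.map_map]
      exact List.map_congr_left (fun a _ => String.toList_ofList) |>.trans (List.map_id _)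
    have hjoin : PySem.Str.isIn "-" (PySem.Str.join sep (L.map String.ofList))
        = PySem.Str.isIn "-" s := by
      simp only [PySem.Str.isIn, PySem.Str.join, String.toList_ofList, hmapL, hLs]
    rw [string_to_interval_set, string_to_interval_set_alt, if_neg hs, if_neg hs, hsp]
    rw [hsp, Option.getD_some] at htoks
    by_cases hbr : PySem.Str.isIn "-" s = true
    · simp only [hjoin]
      rw [if_pos hbr, if_pos hbr]
      rw [pv_foldl_mapM pvAtok (L.map String.ofList) []]
      rw [pv_mapM_congr pvAtok pvBtok _ (fun t ht => pv_tok_eq t (by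
        have := htoks t ht; rw [if_pos hbr] at this; exact this))]
      cases (L.map String.ofList).mapM pvBtok <;> simp
    · simp only [hjoin]
      rw [if_neg hbr, if_neg hbr]
      cases hmm : (L.map String.ofList).mapM PySem.Int.ofStr? with
      | none => rfl
      | some xs =>
        cases hss : PySem.List.sorted xs (fun x => x) false with
        | nil =>
          have hxs : xs = [] := (PySem.List.sorted_eq_nil_iff _ _ _).mp hss
          subst hxs
          rfl
        | cons x rest =>
          show id_list_to_iterval_set (PySem.List.sorted xs fun x => x)
              = match PySem.List.sorted (PySem.Set.ofList xs) fun x => x with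
                | [] => []
                | x :: rest =>
                  (x :: List.filterMap (fun p => if p.1 + 1 < p.2 then some p.2 else none) ((x :: rest).zip rest)).zip
                    (List.filterMap (fun p => if p.1 + 1 < p.2 then some p.1 else none) ((x :: rest).zip rest) ++
                      [rest.getLastD x])
          rw [hss, pv_idlist_eq, pv_sorted_set xs x rest hss]
          rw [pv_extend_rad rest x x]
          exact (pv_zip_extend (pvRad x rest) x x).symm
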